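-- pv_equiv track=rewrite | github.com/znsoooo/IDLE-Advance | idlexx/ReplaceBar.py | PrepFind
-- ===== SOURCE A (Python) =====
-- def PrepFind(s, pat, repl, isre=False, case=True, word=False):
--     if not isre: # TODO self test
--         sp = '\\^$.*+?|()[]{}' # "\"需要放在最前面，否则会发生2次替换
--         for c in sp:
--             pat = pat.replace(c, '\\' + c)
--         repl = repl.replace('\\', '\\\\')
--
-- ##    if not case: # TODO 不区分大小写不应替换原始文本的大小写
-- ##        s = s.lower()
-- ##        pat = pat.lower()
--
--     if word:  # "\b"在"去正则化"之后转换
--         pat = r'\b' + pat + r'\b'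
--
--     return pat, repl
-- ===== SOURCE B (Python) =====
-- def PrepFind(s, pat, repl, isre=False, case=True, word=False):
--     if not isre:
--         out = []
--         for c in pat:
--             if c in '\\^$.*+?|()[]{}':
--                 out.append('\\')
--             out.append(c)
--         pat = ''.join(out)
--         rout = []
--         for c in repl:
--             if c == '\\':
--                 rout.append('\\')
--             rout.append(c)
--         repl = ''.join(rout)
--     if word:
--         pat = '\\b' + pat + '\\b'
--     return pat, repl
-- ===== Notes on version B (the rewrite author's own statement) =====
-- stated objective: simpler
-- what changed: A escapes pat with 14 sequential full-string str.replace passes (and one more str.replace for repl); B makes one single left-to-right pass over each of pat and repl, appending an extra backslash before special characters into an accumulator list joined at the end.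
import Mathlib
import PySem

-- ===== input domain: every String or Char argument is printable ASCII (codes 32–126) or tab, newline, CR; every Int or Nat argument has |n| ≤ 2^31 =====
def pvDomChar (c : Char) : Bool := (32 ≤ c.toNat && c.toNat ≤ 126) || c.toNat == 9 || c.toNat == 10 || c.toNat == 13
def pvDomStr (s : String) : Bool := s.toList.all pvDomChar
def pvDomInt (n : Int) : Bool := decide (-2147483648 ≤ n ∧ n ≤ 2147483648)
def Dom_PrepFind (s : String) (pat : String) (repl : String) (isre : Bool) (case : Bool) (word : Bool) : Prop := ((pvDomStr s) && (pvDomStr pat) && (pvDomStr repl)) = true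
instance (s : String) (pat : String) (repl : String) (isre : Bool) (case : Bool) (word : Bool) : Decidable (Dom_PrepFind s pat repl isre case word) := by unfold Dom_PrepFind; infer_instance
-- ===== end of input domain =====

-- B replaces A's 14 sequential str.replace passes over pat (and the str.replace over repl)
-- by one accumulator loop over each string (simpler); return values are proved identical.

-- ===== PORT A =====
-- sp = '\\^$.*+?|()[]{}' as a list of its characters (Python iterates over the string)
def pvSpA : List Char := ['\\', '^', '$', '.', '*', '+', '?', '|', '(', ')', '[', ']', '{', '}']

def PrepFind (s : String) (pat : String) (repl : String) (isre : Bool) (case : Bool) (word : Bool) : String × String :=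
  let pr : String × String :=
    if !isre then
      (pvSpA.foldl (fun p c => PySem.Str.replace p (String.ofList [c]) (String.ofList ['\\', c])) pat,
       PySem.Str.replace repl "\\" "\\\\")
    else (pat, repl)
  -- r'\b' + pat + r'\b'
  let pat2 := if word then String.ofList ('\\' :: 'b' :: pr.1.toList ++ ['\\', 'b']) else pr.1
  (pat2, pr.2)

-- ===== PORT B =====
-- the membership string '\\^$.*+?|()[]{}' of B's `c in ...` test
def pvSpB : List Char := ['\\', '^', '$', '.', '*', '+', '?', '|', '(', ')', '[', ']', '{', '}']

-- the `for c in pat` loop: out is the accumulator (kept reversed, joined at the end)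
def pvEscLoop (acc : List Char) : List Char → List Char
  | [] => acc.reverse
  | c :: t => pvEscLoop (if pvSpB.contains c then c :: '\\' :: acc else c :: acc) t

-- the `for c in repl` loop
def pvDblLoop (acc : List Char) : List Char → List Char
  | [] => acc.reverse
  | c :: t => pvDblLoop (if c = '\\' then c :: '\\' :: acc else c :: acc) t

def PrepFind_alt (s : String) (pat : String) (repl : String) (isre : Bool) (case : Bool) (word : Bool) : String × String :=
  let pr : String × String :=
    if !isre then
      (String.ofList (pvEscLoop [] pat.toList), String.ofList (pvDblLoop [] repl.toList))
    else (pat, repl)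
  let pat2 := if word then String.ofList ('\\' :: 'b' :: pr.1.toList ++ ['\\', 'b']) else pr.1
  (pat2, pr.2)

-- ===== PRECONDITION & SPEC =====
def Spec_PrepFind (s : String) (pat : String) (repl : String) (isre : Bool) (case : Bool) (word : Bool) (out : String × String) : Prop := out = PrepFind_alt s pat repl isre case word
instance (s : String) (pat : String) (repl : String) (isre : Bool) (case : Bool) (word : Bool) (out : String × String) : Decidable (Spec_PrepFind s pat repl isre case word out) := by unfold Spec_PrepFind; infer_instance

-- ===== CLAIM (what is proved, stated in full; the proofs are below) =====
def Claim_equal_PrepFind : Prop := ∀ (s : String) (pat : String) (repl : String) (isre : Bool) (case : Bool) (word : Bool), Dom_PrepFind s pat repl isre case word → Spec_PrepFind s pat repl isre case word (PrepFind s pat repl isre case word)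

-- ===== LEMMAS AND PROOFS =====

-- str.replace with a single-character pattern is a per-character substitution
theorem pv_rep_go (a : Char) (ns : List Char) :
    ∀ (fuel : Nat) (l acc : List Char), l.length ≤ fuel →
      PySem.Chars.replace.go [a] ns fuel l acc
        = acc.reverse ++ l.flatMap (fun x => if x = a then ns else [x]) := by
  intro fuel
  induction fuel with
  | zero => intro l acc h; simp at h; subst h; simp [PySem.Chars.replace.go]
  | succ n ih =>
    intro l acc h
    cases l with
    | nil => simp [PySem.Chars.replace.go]
    | cons c t =>
      have htn : t.length ≤ n := by simp at h; omega
      rw [PySem.Chars.replace.go]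
      simp only [List.isPrefixOf, Bool.and_true, List.flatMap_cons]
      by_cases hc : a = c
      · subst hc
        rw [if_pos (by simp)]
        simp only [List.length_cons, List.length_nil, List.drop_succ_cons, List.drop_zero, if_true]
        rw [ih t _ htn]
        simp
      · rw [if_neg (by simpa using hc)]
        rw [ih t _ htn]
        have : ¬ (c = a) := fun h' => hc h'.symm
        simp [this]

theorem pv_rep_single (cs : List Char) (a : Char) (ns : List Char) :
    PySem.Chars.replace cs [a] ns = cs.flatMap (fun x => if x = a then ns else [x]) := by
  simp [PySem.Chars.replace, pv_rep_go a ns cs.length cs [] le_rfl]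

-- a sequence of single-character substitutions acts characterwise
theorem pv_foldl_rep_flatMap (sps : List Char) : ∀ cs : List Char,
    sps.foldl (fun l c => PySem.Chars.replace l [c] ['\\', c]) cs
      = cs.flatMap (fun x => sps.foldl (fun l c => PySem.Chars.replace l [c] ['\\', c]) [x]) := by
  induction sps with
  | nil => intro cs; simp
  | cons a t ih =>
    intro cs
    simp only [List.foldl_cons]
    rw [pv_rep_single, ih, List.flatMap_assoc]
    apply List.flatMap_congr
    intro x _
    rw [pv_rep_single]
    simp only [List.flatMap_cons, List.flatMap_nil, List.append_nil]
    exact (ih _).symm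

-- the effect of A's whole substitution chain on one character
theorem pv_F_char (x : Char) :
    pvSpA.foldl (fun l c => PySem.Chars.replace l [c] ['\\', c]) [x]
      = if pvSpB.contains x then ['\\', x] else [x] := by
  by_cases h : pvSpB.contains x
  · rw [if_pos h]
    rw [pvSpB, List.contains_eq_mem, decide_eq_true_iff] at h
    simp only [List.mem_cons, List.not_mem_nil, or_false] at h
    rcases h with h | h | h | h | h | h | h | h | h | h | h | h | h | h <;> subst h <;> decide
  · rw [if_neg h]
    rw [pvSpB, List.contains_eq_mem, decide_eq_true_iff] at h
    simp only [List.mem_cons, List.not_mem_nil, or_false, not_or] at h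
    obtain ⟨h1, h2, h3, h4, h5, h6, h7, h8, h9, h10, h11, h12, h13, h14⟩ := h
    simp [pvSpA, List.foldl, pv_rep_single, h1, h2, h3, h4, h5, h6, h7, h8, h9, h10, h11, h12, h13, h14]

-- bridge: A's fold over Strings, read back as a char list
theorem pv_foldl_toList (sps : List Char) : ∀ pat : String,
    (sps.foldl (fun p c => PySem.Str.replace p (String.ofList [c]) (String.ofList ['\\', c])) pat).toList
      = sps.foldl (fun l c => PySem.Chars.replace l [c] ['\\', c]) pat.toList := by
  induction sps with
  | nil => intro pat; rfl
  | cons a t ih =>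
    intro pat
    simp only [List.foldl_cons, ih, PySem.Str.toList_replace, String.toList_ofList]

-- B's accumulator loops, characterized by flatMap
theorem pv_escLoop_eq : ∀ (cs acc : List Char),
    pvEscLoop acc cs = acc.reverse ++ cs.flatMap (fun x => if pvSpB.contains x then ['\\', x] else [x]) := by
  intro cs
  induction cs with
  | nil => intro acc; simp [pvEscLoop]
  | cons c t ih =>
    intro acc
    rw [pvEscLoop, ih]
    by_cases h : c ∈ pvSpB <;> simp [List.contains_eq_mem, h]

theorem pv_dblLoop_eq : ∀ (cs acc : List Char),
    pvDblLoop acc cs = acc.reverse ++ cs.flatMap (fun x => if x = '\\' then ['\\', '\\'] else [x]) := by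
  intro cs
  induction cs with
  | nil => intro acc; simp [pvDblLoop]
  | cons c t ih =>
    intro acc
    rw [pvDblLoop, ih]
    by_cases h : c = '\\' <;> simp [h]

-- A's chain of replaces equals B's single escaping pass, on char lists
theorem pv_escape_eq (cs : List Char) :
    pvSpA.foldl (fun l c => PySem.Chars.replace l [c] ['\\', c]) cs = pvEscLoop [] cs := by
  rw [pv_foldl_rep_flatMap, pv_escLoop_eq]
  simp only [List.reverse_nil, List.nil_append]
  apply List.flatMap_congr
  intro x _
  rw [pv_F_char]

-- A's repl.replace('\\','\\\\') equals B's doubling loop, on char lists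
theorem pv_dbl_eq (repl : String) :
    (PySem.Str.replace repl "\\" "\\\\").toList = pvDblLoop [] repl.toList := by
  rw [PySem.Str.toList_replace]
  show PySem.Chars.replace repl.toList ['\\'] ['\\', '\\'] = _
  rw [pv_rep_single, pv_dblLoop_eq]
  simp

-- ===== VERDICT (by name: the statement is the Claim_ definition above) =====
theorem PrepFind_spec : Claim_equal_PrepFind := by
  intro s pat repl isre case word _
  unfold Spec_PrepFind PrepFind PrepFind_alt
  cases isre with
  | true => simp
  | false =>
    simp only [Bool.not_false, if_true]
    have hpat : (pvSpA.foldl (fun p c => PySem.Str.replace p (String.ofList [c]) (String.ofList ['\\', c])) pat)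
        = String.ofList (pvEscLoop [] pat.toList) := by
      apply String.toList_inj.mp
      rw [pv_foldl_toList, pv_escape_eq, String.toList_ofList]
    have hrepl : PySem.Str.replace repl "\\" "\\\\" = String.ofList (pvDblLoop [] repl.toList) := by
      apply String.toList_inj.mp
      rw [pv_dbl_eq, String.toList_ofList]
    rw [hpat, hrepl]
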